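-- pv_equiv track=rewrite | github.com/choener/Prj-IsotopeSeparation | IsotopeSep/Construct.py | kmerAt
-- ===== SOURCE A (Python) =====
-- def kmerAt(k,nucs,i):
--   lr = int((k-1)/2)
--   kmer=[]
--   for i in range(i-lr-1,i+lr):
--     j = min(max(0,i),len(nucs)-1)
--     n = nucs[j]
--     kmer.append(n)
--   return ''.join(kmer)
-- ===== SOURCE B (Python) =====
-- def kmerAt(k, nucs, i):
--     lr = int((k - 1) / 2)
--     L = 2 * lr + 1
--     if L <= 0:
--         return ''
--     low = i - lr - 1
--     n = len(nucs)
--     left = min(L, max(0, -low))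
--     right = min(L, max(0, (low + L - 1) - (n - 1)))
--     mid = L - left - right
--     start = max(0, low)
--     return nucs[0] * left + nucs[start:start + mid] + nucs[-1] * right
-- ===== Notes on version B (the rewrite author's own statement) =====
-- stated objective: faster
-- what changed: Replaces A's per-position loop (clamp each window index, look up one char, append) by closed-form arithmetic: compute the left/right pad counts and take one slice, returning nucs[0]*left + nucs[start:start+mid] + nucs[-1]*right.
import Mathlib
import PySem

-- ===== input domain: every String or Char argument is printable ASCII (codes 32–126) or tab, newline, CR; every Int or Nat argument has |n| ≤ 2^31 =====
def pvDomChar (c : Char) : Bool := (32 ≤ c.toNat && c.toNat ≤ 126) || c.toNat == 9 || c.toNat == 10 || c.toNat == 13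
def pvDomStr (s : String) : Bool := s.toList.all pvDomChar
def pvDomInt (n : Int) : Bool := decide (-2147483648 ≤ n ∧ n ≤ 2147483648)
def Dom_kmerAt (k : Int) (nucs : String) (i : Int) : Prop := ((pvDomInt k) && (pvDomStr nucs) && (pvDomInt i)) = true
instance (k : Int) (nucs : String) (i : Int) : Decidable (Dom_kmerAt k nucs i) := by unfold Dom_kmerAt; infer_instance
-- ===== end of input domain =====

-- B replaces A's per-position loop by closed-form pad counts and one slice (objective: simpler decomposition).

-- ===== PORT A =====
-- int((k-1)/2) is exact truncating division for |k| ≤ 2^31 (float is exact there) = Int.tdiv.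
-- ''.join of a list of chars = String.mk. nucs[j] = PySem.Str.pyGet?; the .getD ' ' default is
-- never reached on Pre_ (there j is in range).
def kmerAt (k : Int) (nucs : String) (i : Int) : String :=
  let lr := (k - 1).tdiv 2
  let kmer : List Char :=
    (PySem.List.pyRange (i - lr - 1) (i + lr) 1).foldl
      (fun kmer i2 =>
        let j := min (max 0 i2) (PySem.Str.len nucs - 1)
        let n := (PySem.Str.pyGet? nucs j).getD ' '
        kmer ++ [n]) []
  String.mk kmer

-- ===== PORT B =====
-- nucs[0] / nucs[-1] via PySem.Str.pyGet? (defaults unreachable on Pre_); slice via PySem.List.slice.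
def kmerAt_alt (k : Int) (nucs : String) (i : Int) : String :=
  let lr := (k - 1).tdiv 2
  let L := 2 * lr + 1
  if L ≤ 0 then "" else
    let low := i - lr - 1
    let n := PySem.Str.len nucs
    let left := min L (max 0 (-low))
    let right := min L (max 0 ((low + L - 1) - (n - 1)))
    let mid := L - left - right
    let start := max 0 low
    let c0 := (PySem.Str.pyGet? nucs 0).getD ' '
    let cl := (PySem.Str.pyGet? nucs (-1)).getD ' '
    String.mk (List.replicate left.toNat c0
      ++ PySem.List.slice nucs.toList (some start) (some (start + mid))
      ++ List.replicate right.toNat cl)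

-- ===== PRECONDITION & SPEC =====
-- Pre_ excludes exactly the inputs where A raises IndexError: nucs empty with a nonempty
-- window (k ≥ 0 gives lr ≥ 0, so the loop indexes nucs[-1]); B raises there too.
def Pre_kmerAt (k : Int) (nucs : String) (i : Int) : Prop := nucs ≠ "" ∨ k < 0
instance (k : Int) (nucs : String) (i : Int) : Decidable (Pre_kmerAt k nucs i) := by unfold Pre_kmerAt; infer_instance

def pvWitness_kmerAt : Int × String × Int := (5, "ACGT", 2)

def Spec_kmerAt (k : Int) (nucs : String) (i : Int) (out : String) : Prop := out = kmerAt_alt k nucs i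
instance (k : Int) (nucs : String) (i : Int) (out : String) : Decidable (Spec_kmerAt k nucs i out) := by unfold Spec_kmerAt; infer_instance

-- ===== CLAIM (what is proved, stated in full; the proofs are below) =====
def Claim_equal_kmerAt : Prop := ∀ (k : Int) (nucs : String) (i : Int), Dom_kmerAt k nucs i → Pre_kmerAt k nucs i → Spec_kmerAt k nucs i (kmerAt k nucs i)

-- ===== LEMMAS AND PROOFS =====

-- a map over a range on which f is constant is a replicate
lemma map_const_pyRange {α : Type} (f : Int → α) (c : α) (a b : Int)
    (h : ∀ j, a ≤ j → j < b → f j = c) :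
    (PySem.List.pyRange a b 1).map f = List.replicate (b - a).toNat c := by
  rw [PySem.List.pyRange_one, List.map_map]
  refine List.eq_replicate_iff.mpr ⟨by simp, ?_⟩
  intro x hx
  simp only [List.mem_map, List.mem_range, Function.comp] at hx
  obtain ⟨t, ht, rfl⟩ := hx
  exact h _ (by omega) (by omega)

-- a map of in-bounds lookups over a range is a slice (drop/take)
lemma map_get_pyRange (cs : List Char) (d : Char) (a b : Int)
    (ha : 0 ≤ a) (hb : b ≤ (cs.length : Int)) :
    (PySem.List.pyRange a b 1).map (fun j => (PySem.List.pyGet? cs j).getD d)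
      = (cs.drop a.toNat).take (b.toNat - a.toNat) := by
  by_cases hba : b ≤ a
  · rw [PySem.List.pyRange_one_eq_nil hba]
    have : b.toNat - a.toNat = 0 := by omega
    simp [this]
  · push_neg at hba
    apply List.ext_getElem
    · simp [PySem.List.length_pyRange_one]; omega
    · intro t h1 h2
      have hlen : t < (b - a).toNat := by
        simpa [PySem.List.length_pyRange_one] using h1
      rw [List.getElem_map, PySem.List.getElem_pyRange_one]
      have h0 : (0:Int) ≤ a + t := by omega
      have h1' : a + (t:Int) < (cs.length : Int) := by omega
      rw [PySem.List.pyGet?_of_nonneg cs h0,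
        List.getElem?_eq_getElem (by omega), Option.getD_some]
      rw [List.getElem_take, List.getElem_drop]
      congr 1
      omega

-- lr = int((k-1)/2) seen through floor division of the reflected argument
lemma tdiv_lr_eq (k : Int) (h : k < 0) : (k - 1).tdiv 2 = -((1 - k) / 2) := by
  have h1 : (k - 1).tdiv 2 = -((1 - k).tdiv 2) := by
    rw [← Int.neg_tdiv]; ring_nf
  rw [h1, Int.tdiv_eq_ediv_of_nonneg (by omega)]

theorem kmerAt_spec : Claim_equal_kmerAt := by
  intro k nucs i _ hpre
  simp only [Spec_kmerAt, kmerAt, kmerAt_alt, PySem.Str.len_eq, PySem.Str.pyGet?,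
    PySem.Chars.pyGet?]
  set cs := nucs.toList with hcs
  set lr := (k - 1).tdiv 2 with hlr
  by_cases hneg : 2 * lr + 1 ≤ 0
  · -- empty window: both produce the empty string
    rw [if_pos hneg, PySem.List.pyRange_one_eq_nil (by omega)]
    rfl
  · rw [if_neg hneg]
    push_neg at hneg
    -- lr ≥ 0 forces k ≥ 0, so Pre_ gives a nonempty string
    have hk : 0 ≤ k := by
      by_contra hk
      have := tdiv_lr_eq k (by omega)
      omega
    have hne : cs ≠ [] := by
      rcases hpre with h | h
      · rw [hcs]; intro h2
        exact h (by rwa [String.toList_eq_nil_iff] at h2)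
      · omega
    have hn : 1 ≤ (cs.length : Int) := by
      have := List.length_pos_of_ne_nil hne
      omega
    set n := (cs.length : Int) with hn'
    set L := 2 * lr + 1 with hL
    set low := i - lr - 1 with hlow
    set left := min L (max 0 (-low)) with hleft
    set right := min L (max 0 ((low + L - 1) - (n - 1))) with hright
    set mid := L - left - right with hmid
    set start := max 0 low with hstart
    have hesplit : i + lr = low + L := by omega
    have hmid0 : 0 ≤ mid := by omega
    rw [hesplit,
      PySem.List.pyRange_one_append low (low + left) (low + L) (by omega) (by omega),
      PySem.List.pyRange_one_append (low + left) (low + left + mid) (low + L)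
        (by omega) (by omega),
      PySem.List.foldl_append_singleton_eq_map
        (fun i2 => (PySem.List.pyGet? cs (min (max 0 i2) (n - 1))).getD ' '),
      List.nil_append, List.map_append, List.map_append]
    have h1 : (PySem.List.pyRange low (low + left)).map
        (fun i2 => (PySem.List.pyGet? cs (min (max 0 i2) (n - 1))).getD ' ')
        = List.replicate left.toNat ((PySem.List.pyGet? cs 0).getD ' ') := by
      rw [map_const_pyRange _ _ low (low + left) ?_]
      · congr 1; omega
      · intro j hj1 hj2
        have : min (max 0 j) (n - 1) = 0 := by omega
        rw [this]
    have h2 : (PySem.List.pyRange (low + left) (low + left + mid)).map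
        (fun i2 => (PySem.List.pyGet? cs (min (max 0 i2) (n - 1))).getD ' ')
        = PySem.List.slice cs (some start) (some (start + mid)) := by
      by_cases hm : mid = 0
      · rw [hm, add_zero, PySem.List.pyRange_one_eq_nil (by omega), List.map_nil,
          PySem.List.slice_toNat cs (by omega) (by omega)]
        simp
      · -- a nonempty in-bounds window: the clamp is the identity there
        have hs : low + left = start := by omega
        rw [hs, List.map_congr_left (g := fun j => (PySem.List.pyGet? cs j).getD ' ') ?_,
          map_get_pyRange cs ' ' start (start + mid) (by omega) (by omega),
          PySem.List.slice_toNat cs (by omega) (by omega)]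
        intro j hj
        rw [PySem.List.mem_pyRange_one] at hj
        have : min (max 0 j) (n - 1) = j := by omega
        rw [this]
    have h3 : (PySem.List.pyRange (low + left + mid) (low + L)).map
        (fun i2 => (PySem.List.pyGet? cs (min (max 0 i2) (n - 1))).getD ' ')
        = List.replicate right.toNat ((PySem.List.pyGet? cs (-1)).getD ' ') := by
      rw [map_const_pyRange _ _ (low + left + mid) (low + L) ?_]
      · congr 1; omega
      · intro j hj1 hj2
        have hcl : min (max 0 j) (n - 1) = n - 1 := by omega
        rw [hcl, PySem.List.pyGet?_of_nonneg cs (by omega), PySem.List.pyGet?_neg_one,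
          List.getLast?_eq_some_getLast hne, List.getElem?_eq_getElem (by omega),
          List.getLast_eq_getElem hne]
        simp only [Option.getD_some]
        congr 1
        omega
    rw [h1, h2, h3, List.append_assoc]
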